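-- pv_equiv track=rewrite | github.com/PyPSA/PyPSA | pypsa/tepopf.py | equivalent_cycle
-- ===== SOURCE A (Python) =====
-- from collections import deque
--
-- def equivalent_cycle(c, d):
--     """
--     Checks whether two cycles are equivalent
--     when disregarding orientation and first vertex.
--
--     Parameters
--     ----------
--     c : list
--         List of vertices representing the first cycle.
--     d : list
--         List of vertices representing the second cycle.
--
--     Returns
--     -------
--     bool
--         Cycles are equivalent.
--     """
--
--     dc, dd = (deque(c), deque(d))
--     dd_rev = dd.copy()
--     dd_rev.reverse()
--     for _ in range(len(dd)):
--         dd.rotate(1)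
--         dd_rev.rotate(1)
--         if dd == dc or dd_rev == dc:
--             return True
--     return False
-- ===== SOURCE B (Python) =====
-- def _borders(p):
--     """Morris-Pratt failure table: f[j] = length of the longest proper
--     border (prefix that is also a suffix) of p[:j], for 1 <= j <= len(p)."""
--     m = len(p)
--     f = [0] * (m + 1)
--     k = 0
--     for j in range(1, m):
--         x = p[j]
--         while k and p[k] != x:
--             k = f[k]
--         if p[k] == x:
--             k += 1
--         f[j + 1] = k
--     return f
--
--
-- def _contains(t, p, f):
--     """Does the nonempty pattern p occur as a contiguous run of t?
--     Morris-Pratt scan of t in O(len(t) + len(p))."""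
--     m = len(p)
--     q = 0
--     for x in t:
--         while q and p[q] != x:
--             q = f[q]
--         if p[q] == x:
--             q += 1
--             if q == m:
--                 return True
--     return False
--
--
-- def equivalent_cycle(c, d):
--     """
--     Checks whether two cycles are equivalent
--     when disregarding orientation and first vertex.
--     """
--     n = len(c)
--     if len(d) != n:
--         return False
--     if n == 0:
--         return True
--     t = c + c
--     if _contains(t, d, _borders(d)):
--         return True
--     rd = d[::-1]
--     return _contains(t, rd, _borders(rd))
-- ===== Notes on version B (the rewrite author's own statement) =====
-- stated objective: alternative
-- what changed: Replaces A's try-every-rotation deque loop (n rotations, each compared against c) by a Morris-Pratt failure-function substring search of d and of reversed d in c+c, a single linear scan per pattern.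
-- intended difference: On the single input c=[] and d=[], A's loop body never runs so A returns False, while B returns True, the intended answer since two empty cycles are trivially equivalent. — e.g. on equivalent_cycle([], []): A returns false, B returns true
import Mathlib
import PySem

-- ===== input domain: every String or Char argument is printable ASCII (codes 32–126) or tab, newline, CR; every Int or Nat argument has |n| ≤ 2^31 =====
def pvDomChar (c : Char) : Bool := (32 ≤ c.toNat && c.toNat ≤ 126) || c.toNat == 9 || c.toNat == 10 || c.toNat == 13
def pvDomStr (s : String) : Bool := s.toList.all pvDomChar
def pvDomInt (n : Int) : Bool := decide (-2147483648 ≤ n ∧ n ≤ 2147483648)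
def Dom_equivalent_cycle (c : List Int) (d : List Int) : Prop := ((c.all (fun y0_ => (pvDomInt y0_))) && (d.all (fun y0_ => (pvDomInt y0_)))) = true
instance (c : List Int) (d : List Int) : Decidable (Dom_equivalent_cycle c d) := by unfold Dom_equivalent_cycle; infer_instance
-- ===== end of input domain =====

-- B replaces A's deque rotate-and-compare loop by a Morris–Pratt (failure-function) substring
-- search of d and of reversed d in c ++ c (a different algorithm; not measured faster here);
-- on the single input ([], []) A returns False while B returns the intended True (D_ below).


-- ===== PORT A =====
-- deque.rotate(1): the last element moves to the front
def pvRotOnce (l : List Int) : List Int :=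
  match l.reverse with
  | [] => []
  | x :: rest => x :: rest.reverse

-- the 'for _ in range(len(dd))' loop: rotate both deques, test, recurse on the remaining fuel
def pvLoopA (dc : List Int) (dd : List Int) (ddrev : List Int) : Nat → Bool
  | 0 => false
  | k + 1 =>
    let dd' := pvRotOnce dd
    let ddr' := pvRotOnce ddrev
    if dd' = dc ∨ ddr' = dc then true else pvLoopA dc dd' ddr' k

def equivalent_cycle (c : List Int) (d : List Int) : Bool :=
  pvLoopA c d d.reverse d.length

-- ===== PORT B =====
-- the 'while k and p[k] != x: k = f[k]' loop of Source B; the failure value f[k] is < k on every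
-- chain Source B runs, so fuel = the starting k always suffices
def pvChain (p : List Int) (f : List Nat) (x : Int) : Nat → Nat → Nat
  | 0, q => q
  | fuel + 1, q => if q ≠ 0 ∧ p.getD q 0 ≠ x then pvChain p f x fuel (f.getD q 0) else q

-- the 'for j in range(1, m)' loop of _borders, iterating over the list of indices j
def pvBordersGo (p : List Int) : List Nat → Nat → List Nat → List Nat
  | f, _, [] => f
  | f, k, j :: js =>
    let x := p.getD j 0
    let r := pvChain p f x k k
    let k' := if p.getD r 0 = x then r + 1 else r
    pvBordersGo p (f.set (j + 1) k') k' js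

-- _borders(p): f = [0]*(m+1), then the loop over range(1, m)
def pvBorders (p : List Int) : List Nat :=
  pvBordersGo p (List.replicate (p.length + 1) 0) 0 (List.range' 1 (p.length - 1))

-- the 'for x in t' loop of _contains, with early return on q == m
def pvContainsGo (p : List Int) (f : List Nat) (m : Nat) : List Int → Nat → Bool
  | [], _ => false
  | x :: rest, q =>
    let r := pvChain p f x q q
    if p.getD r 0 = x then
      if r + 1 = m then true else pvContainsGo p f m rest (r + 1)
    else pvContainsGo p f m rest r

def pvContains (t : List Int) (p : List Int) (f : List Nat) : Bool :=
  pvContainsGo p f p.length t 0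

def equivalent_cycle_alt (c : List Int) (d : List Int) : Bool :=
  let n := c.length
  if d.length ≠ n then false
  else if n = 0 then true
  else
    let t := c ++ c
    if pvContains t d (pvBorders d) then true
    else pvContains t d.reverse (pvBorders d.reverse)

-- ===== PRECONDITION & SPEC =====
-- On c = [] and d = [] A's loop body never runs so A returns False; B returns True, the intended
-- answer since two empty cycles are trivially equivalent.
def D_equivalent_cycle (c : List Int) (d : List Int) : Prop := c = [] ∧ d = []
instance (c : List Int) (d : List Int) : Decidable (D_equivalent_cycle c d) := by unfold D_equivalent_cycle; infer_instance
def Spec_equivalent_cycle (c : List Int) (d : List Int) (out : Bool) : Prop := ¬ D_equivalent_cycle c d → out = equivalent_cycle_alt c d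
instance (c : List Int) (d : List Int) (out : Bool) : Decidable (Spec_equivalent_cycle c d out) := by unfold Spec_equivalent_cycle; infer_instance
def pvDiffWitness_equivalent_cycle : List Int × List Int := ([], [])
def pvDiffWitnessOut_equivalent_cycle : Bool × Bool := (false, true)

-- ===== CLAIM (what is proved, stated in full; the proofs are below) =====
def Claim_unchanged_equivalent_cycle : Prop := ∀ (c : List Int) (d : List Int), Dom_equivalent_cycle c d → Spec_equivalent_cycle c d (equivalent_cycle c d)
def Claim_changed_equivalent_cycle : Prop := Dom_equivalent_cycle (pvDiffWitness_equivalent_cycle.1) (pvDiffWitness_equivalent_cycle.2) ∧ D_equivalent_cycle (pvDiffWitness_equivalent_cycle.1) (pvDiffWitness_equivalent_cycle.2) ∧ equivalent_cycle (pvDiffWitness_equivalent_cycle.1) (pvDiffWitness_equivalent_cycle.2) = pvDiffWitnessOut_equivalent_cycle.1 ∧ equivalent_cycle_alt (pvDiffWitness_equivalent_cycle.1) (pvDiffWitness_equivalent_cycle.2) = pvDiffWitnessOut_equivalent_cycle.2 ∧ pvDiffWitnessOut_equivalent_cycle.1 ≠ pvDiffWitnessOut_equivalent_cycle.2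
def Claim_exact_equivalent_cycle : Prop := ∀ (c : List Int) (d : List Int), Dom_equivalent_cycle c d → D_equivalent_cycle c d → equivalent_cycle c d ≠ equivalent_cycle_alt c d

-- ===== LEMMAS AND PROOFS =====

-- ---- rotations (shared vocabulary for both characterisations) ----
def pvRotL (c : List Int) (i : Nat) : List Int := c.drop i ++ c.take i
def pvRotR (d : List Int) (m : Nat) : List Int :=
  d.drop (d.length - m) ++ d.take (d.length - m)

theorem pvRotOnce_snoc (xs : List Int) (y : Int) : pvRotOnce (xs ++ [y]) = y :: xs := by
  simp [pvRotOnce]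

theorem pvRotOnce_rotR (d : List Int) (j : Nat) (hj : j < d.length) :
    pvRotOnce (pvRotR d j) = pvRotR d (j + 1) := by
  have ht : d.length - j = (d.length - (j + 1)) + 1 := by omega
  have hlt : d.length - (j + 1) < d.length := by omega
  have htake : d.take (d.length - j)
      = d.take (d.length - (j + 1)) ++ [d[d.length - (j + 1)]] := by
    rw [ht, List.take_add_one]
    simp [List.getElem?_eq_getElem hlt]
  have hdrop : d.drop (d.length - (j + 1)) = d[d.length - (j + 1)] :: d.drop (d.length - j) := by
    rw [ht]
    exact List.drop_eq_getElem_cons hlt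
  unfold pvRotR
  rw [htake, ← List.append_assoc, pvRotOnce_snoc, hdrop]
  simp

theorem pvLoopA_iff (dc d : List Int) : ∀ (k j : Nat), j + k = d.length →
    ∀ (dr : List Int), dr.length = d.length →
    (pvLoopA dc (pvRotR d j) (pvRotR dr j) k = true ↔
      ∃ m, j < m ∧ m ≤ d.length ∧ (pvRotR d m = dc ∨ pvRotR dr m = dc)) := by
  intro k
  induction k with
  | zero =>
    intro j hj dr hdr
    simp only [pvLoopA]
    constructor
    · intro h; exact absurd h (by simp)
    · rintro ⟨m, h1, h2, _⟩; omega
  | succ k ih =>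
    intro j hj dr hdr
    have hjd : j < d.length := by omega
    simp only [pvLoopA]
    rw [pvRotOnce_rotR d j hjd, pvRotOnce_rotR dr j (by omega)]
    by_cases h : pvRotR d (j + 1) = dc ∨ pvRotR dr (j + 1) = dc
    · simp only [if_pos h, true_iff]
      exact ⟨j + 1, by omega, by omega, h⟩
    · rw [if_neg h]
      rw [ih (j + 1) (by omega) dr hdr]
      constructor
      · rintro ⟨m, h1, h2, h3⟩; exact ⟨m, by omega, h2, h3⟩
      · rintro ⟨m, h1, h2, h3⟩
        refine ⟨m, ?_, h2, h3⟩
        rcases Nat.eq_or_lt_of_le (Nat.succ_le_of_lt h1) with he | hl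
        · subst he
          exact absurd h3 h
        · omega

theorem pvRotR_zero (d : List Int) : pvRotR d 0 = d := by simp [pvRotR]

theorem equivalent_cycle_iff (c d : List Int) :
    (equivalent_cycle c d = true ↔
      ∃ m, 1 ≤ m ∧ m ≤ d.length ∧ (pvRotR d m = c ∨ pvRotR d.reverse m = c)) := by
  have h := pvLoopA_iff c d d.length 0 (by omega) d.reverse (by simp)
  rw [pvRotR_zero, pvRotR_zero] at h
  simpa [equivalent_cycle] using h

theorem pvRotL_rotR (d : List Int) (m : Nat) (hm : m ≤ d.length) :
    pvRotL (pvRotR d m) m = d := by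
  unfold pvRotL pvRotR
  have h1 : (d.drop (d.length - m)).length = m := by simp; omega
  rw [List.drop_left' h1, List.take_left' h1, List.take_append_drop]

theorem pvRotR_rotL (c : List Int) (m : Nat) (hm : m ≤ c.length) :
    pvRotR (pvRotL c m) m = c := by
  unfold pvRotR pvRotL
  have h1 : (c.drop m).length = (c.drop m ++ c.take m).length - m := by simp; omega
  rw [List.drop_left' h1, List.take_left' h1, List.take_append_drop]

theorem pvRotR_eq_iff (c d : List Int) (m : Nat) (hlen : c.length = d.length)
    (hm : m ≤ d.length) : pvRotR d m = c ↔ pvRotL c m = d := by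
  constructor
  · intro h
    rw [← h, pvRotL_rotR d m hm]
  · intro h
    rw [← h, pvRotR_rotL c m (by omega)]

theorem pvSlice_eq_rotL (c : List Int) (i : Nat) (hi : i ≤ c.length) :
    ((c ++ c).drop i).take c.length = pvRotL c i := by
  unfold pvRotL
  rw [List.drop_append_of_le_length hi]
  rw [List.take_append]
  have h1 : (c.drop i).length = c.length - i := by simp
  have : c.length - (c.drop i).length = i := by omega
  rw [this]
  have : (c.drop i).take c.length = c.drop i := List.take_of_length_le (by simp)
  rw [this]

theorem pvRotL_length (c : List Int) : pvRotL c c.length = pvRotL c 0 := by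
  simp [pvRotL]

theorem pvRotR_length_ne (c d : List Int) (m : Nat) (hlen : c.length ≠ d.length) :
    pvRotR d m ≠ c := by
  intro h
  apply hlen
  rw [← h]
  simp [pvRotR]

-- ---- Morris–Pratt vocabulary: borders and the search invariant ----
-- b is a border length of p.take j (prefix of p that is also a suffix of p.take j)
def pvBrd (p : List Int) (b j : Nat) : Prop := b ≤ j ∧ p.take b <:+ p.take j

-- f is a correct failure table for all indices 1..J
def pvGoodF (p : List Int) (f : List Nat) (J : Nat) : Prop :=
  ∀ j, 1 ≤ j → j ≤ J → f.getD j 0 < j ∧ pvBrd p (f.getD j 0) j ∧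
    ∀ b, b < j → pvBrd p b j → b ≤ f.getD j 0

-- q is the length of the longest prefix of p that is a suffix of the scanned text s
def pvSInv (p : List Int) (s : List Int) (q : Nat) : Prop :=
  q ≤ p.length ∧ p.take q <:+ s ∧ ∀ b, b ≤ p.length → p.take b <:+ s → b ≤ q

theorem pvBrd_trans (p : List Int) (a b c : Nat) (h1 : pvBrd p a b) (h2 : pvBrd p b c) :
    pvBrd p a c := ⟨le_trans h1.1 h2.1, h1.2.trans h2.2⟩

theorem pvBrd_of_suffix_le (p : List Int) (a b j : Nat) (hj : j ≤ p.length) (hab : a ≤ b)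
    (ha : pvBrd p a j) (hb : pvBrd p b j) : pvBrd p a b := by
  refine ⟨hab, List.suffix_of_suffix_length_le ha.2 hb.2 ?_⟩
  simp only [List.length_take]
  have := ha.1; have := hb.1
  omega

theorem pvTake_snoc (p : List Int) (i : Nat) (h : i < p.length) :
    p.take (i + 1) = p.take i ++ [p.getD i 0] := by
  rw [List.take_add_one]
  simp [List.getElem?_eq_getElem h]

theorem pvSuffix_snoc_iff (s l : List Int) (a b : Int) :
    l ++ [a] <:+ s ++ [b] ↔ a = b ∧ l <:+ s := by
  constructor
  · rintro ⟨t, ht⟩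
    rw [← List.append_assoc] at ht
    obtain ⟨h1, h2⟩ := List.append_singleton_inj.mp ht
    exact ⟨h2, t, h1⟩
  · rintro ⟨rfl, t, rfl⟩
    exact ⟨t, by simp⟩

theorem pvTake_suffix_snoc_iff (p s : List Int) (x : Int) (b : Nat) (hb : b < p.length) :
    p.take (b + 1) <:+ s ++ [x] ↔ (p.take b <:+ s ∧ p.getD b 0 = x) := by
  rw [pvTake_snoc p b hb, pvSuffix_snoc_iff]
  tauto

-- the chain loop descends exactly to the longest border of q whose next character is x (or 0)
theorem pvChain_spec (p : List Int) (f : List Nat) (x : Int) (J : Nat)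
    (hJ : J ≤ p.length) (hf : pvGoodF p f J) :
    ∀ fuel q, q ≤ fuel → q ≤ J →
      pvChain p f x fuel q ≤ q ∧ pvBrd p (pvChain p f x fuel q) q ∧
      (pvChain p f x fuel q = 0 ∨ p.getD (pvChain p f x fuel q) 0 = x) ∧
      ∀ b, pvBrd p b q → (b = 0 ∨ p.getD b 0 = x) → b ≤ pvChain p f x fuel q := by
  intro fuel
  induction fuel with
  | zero =>
    intro q hq _
    have hq0 : q = 0 := by omega
    subst hq0
    exact ⟨le_rfl, ⟨le_rfl, List.suffix_refl _⟩, Or.inl rfl, fun b hb _ => hb.1⟩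
  | succ n ih =>
    intro q hq hqJ
    simp only [pvChain]
    by_cases hc : q ≠ 0 ∧ p.getD q 0 ≠ x
    · rw [if_pos hc]
      have hGq := hf q (by omega) hqJ
      have hlt : f.getD q 0 < q := hGq.1
      have hrec := ih (f.getD q 0) (by omega) (by omega)
      obtain ⟨h1, h2, h3, h4⟩ := hrec
      refine ⟨by omega, pvBrd_trans p _ _ _ h2 hGq.2.1, h3, ?_⟩
      intro b hb hstop
      have hbq : b ≠ q := by
        rintro rfl
        rcases hstop with h | h
        · exact hc.1 h
        · exact hc.2 h
      have hble : b ≤ f.getD q 0 := hGq.2.2 b (by have := hb.1; omega) hb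
      exact h4 b (pvBrd_of_suffix_le p b (f.getD q 0) q (by omega) hble hb hGq.2.1) hstop
    · rw [if_neg hc]
      refine ⟨le_rfl, ⟨le_rfl, List.suffix_refl _⟩, ?_, fun b hb _ => hb.1⟩
      by_cases h0 : q = 0
      · exact Or.inl h0
      · right
        by_contra hne
        exact hc ⟨h0, hne⟩

-- one scan step preserves the longest-prefix-suffix invariant
theorem pvExtend_search (p : List Int) (f : List Nat) (x : Int) (s : List Int) (q : Nat)
    (hf : pvGoodF p f p.length) (hInv : pvSInv p s q) (hq : q < p.length) :
    pvSInv p (s ++ [x])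
      (if p.getD (pvChain p f x q q) 0 = x then pvChain p f x q q + 1 else pvChain p f x q q) ∧
    (¬ p.getD (pvChain p f x q q) 0 = x → pvChain p f x q q = 0) := by
  obtain ⟨hqm, hsfx, hmax⟩ := hInv
  obtain ⟨hrq, hrB, hstop, hcmax⟩ :=
    pvChain_spec p f x p.length le_rfl hf q q le_rfl (by omega)
  set r := pvChain p f x q q with hr
  have hrz : ¬ p.getD r 0 = x → r = 0 := by
    intro h
    rcases hstop with h0 | h1
    · exact h0
    · exact absurd h1 h
  refine ⟨?_, hrz⟩
  have htr : p.take r <:+ s := hrB.2.trans hsfx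
  by_cases hx : p.getD r 0 = x
  · rw [if_pos hx]
    refine ⟨by omega, ?_, ?_⟩
    · rw [pvTake_snoc p r (by omega), hx]
      obtain ⟨t, ht⟩ := htr
      exact ⟨t, by rw [← List.append_assoc, ht]⟩
    · intro b hbm hbs
      rcases Nat.eq_zero_or_pos b with rfl | hb1
      · omega
      obtain ⟨b', rfl⟩ : ∃ b', b = b' + 1 := ⟨b - 1, by omega⟩
      rw [pvTake_suffix_snoc_iff p s x b' (by omega)] at hbs
      obtain ⟨hbs', hbx⟩ := hbs
      have hbq : b' ≤ q := hmax b' (by omega) hbs'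
      have hbB : pvBrd p b' q :=
        ⟨hbq, List.suffix_of_suffix_length_le hbs' hsfx (by simp only [List.length_take]; omega)⟩
      have := hcmax b' hbB (Or.inr hbx)
      omega
  · rw [if_neg hx]
    have r0 : r = 0 := hrz hx
    refine ⟨by omega, by rw [r0]; simp, ?_⟩
    intro b hbm hbs
    rcases Nat.eq_zero_or_pos b with rfl | hb1
    · omega
    obtain ⟨b', rfl⟩ : ∃ b', b = b' + 1 := ⟨b - 1, by omega⟩
    rw [pvTake_suffix_snoc_iff p s x b' (by omega)] at hbs
    obtain ⟨hbs', hbx⟩ := hbs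
    have hbq : b' ≤ q := hmax b' (by omega) hbs'
    have hbB : pvBrd p b' q :=
      ⟨hbq, List.suffix_of_suffix_length_le hbs' hsfx (by simp only [List.length_take]; omega)⟩
    have hb0 : b' ≤ r := hcmax b' hbB (Or.inr hbx)
    have hb0' : b' = 0 := by omega
    rw [hb0'] at hbx
    rw [r0] at hx
    exact absurd hbx hx

-- the scan returns true iff p ends at some already-scanned position
theorem pvContainsGo_iff (p : List Int) (f : List Nat) (hf : pvGoodF p f p.length) :
    ∀ (rest s : List Int) (q : Nat), pvSInv p s q → q < p.length →
      (pvContainsGo p f p.length rest q = true ↔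
        ∃ i, 1 ≤ i ∧ i ≤ rest.length ∧ p <:+ s ++ rest.take i) := by
  intro rest
  induction rest with
  | nil =>
    intro s q _ _
    simp only [pvContainsGo]
    constructor
    · intro h; exact absurd h (by simp)
    · rintro ⟨i, h1, h2, _⟩
      simp only [List.length_nil] at h2
      omega
  | cons x rest ih =>
    intro s q hInv hq
    obtain ⟨hInv', hrz⟩ := pvExtend_search p f x s q hf hInv hq
    simp only [pvContainsGo]
    set r := pvChain p f x q q with hrdef
    have hshift : ∀ i, (s ++ (x :: rest).take (i + 1)) = (s ++ [x]) ++ rest.take i := by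
      intro i
      simp [List.take_succ_cons]
    by_cases hx : p.getD r 0 = x
    · rw [if_pos hx]
      rw [if_pos hx] at hInv'
      by_cases hwin : r + 1 = p.length
      · rw [if_pos hwin]
        simp only [true_iff]
        refine ⟨1, le_rfl, by simp, ?_⟩
        have h := hInv'.2.1
        rw [hwin, List.take_length] at h
        simpa using h
      · rw [if_neg hwin]
        have hlt : r + 1 < p.length := by
          have := hInv'.1
          omega
        rw [ih (s ++ [x]) (r + 1) hInv' hlt]
        constructor
        · rintro ⟨i, h1, h2, h3⟩
          refine ⟨i + 1, by omega, by simp only [List.length_cons]; omega, ?_⟩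
          rw [hshift i]
          exact h3
        · rintro ⟨i, h1, h2, h3⟩
          obtain ⟨i', rfl⟩ : ∃ i', i = i' + 1 := ⟨i - 1, by omega⟩
          rw [hshift i'] at h3
          rcases Nat.eq_zero_or_pos i' with rfl | hi1
          · exfalso
            simp only [List.take_zero, List.append_nil] at h3
            have := hInv'.2.2 p.length le_rfl (by rw [List.take_length]; exact h3)
            omega
          · exact ⟨i', hi1, by simp only [List.length_cons] at h2; omega, h3⟩
    · rw [if_neg hx]
      rw [if_neg hx] at hInv'
      have hr0 : r = 0 := hrz hx
      rw [ih (s ++ [x]) r hInv' (by omega)]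
      constructor
      · rintro ⟨i, h1, h2, h3⟩
        refine ⟨i + 1, by omega, by simp only [List.length_cons]; omega, ?_⟩
        rw [hshift i]
        exact h3
      · rintro ⟨i, h1, h2, h3⟩
        obtain ⟨i', rfl⟩ : ∃ i', i = i' + 1 := ⟨i - 1, by omega⟩
        rw [hshift i'] at h3
        rcases Nat.eq_zero_or_pos i' with rfl | hi1
        · exfalso
          simp only [List.take_zero, List.append_nil] at h3
          have := hInv'.2.2 p.length le_rfl (by rw [List.take_length]; exact h3)
          omega
        · exact ⟨i', hi1, by simp only [List.length_cons] at h2; omega, h3⟩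

theorem pvContains_iff (t p : List Int) (f : List Nat) (hf : pvGoodF p f p.length)
    (hm : 1 ≤ p.length) :
    (pvContains t p f = true ↔ ∃ i, 1 ≤ i ∧ i ≤ t.length ∧ p <:+ t.take i) := by
  have hInv : pvSInv p [] 0 := by
    refine ⟨by omega, by simp, ?_⟩
    intro b hb hs
    have h0 : p.take b = [] := List.suffix_nil.mp hs
    rcases List.take_eq_nil_iff.mp h0 with h | h
    · omega
    · exfalso; rw [h] at hm; simp at hm
  have h := pvContainsGo_iff p f hf t [] 0 hInv (by omega)
  simpa [pvContains] using h

-- ---- the failure table Source B builds is correct ----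
theorem pvReplicate_getD (m i : Nat) : (List.replicate m (0 : Nat)).getD i 0 = 0 := by
  rw [List.getD_eq_getElem?_getD, List.getElem?_replicate]
  split <;> rfl

theorem pvBordersGo_good (p : List Int) :
    ∀ (len j : Nat) (f : List Nat) (k : Nat),
      1 ≤ j → j + len = p.length → f.length = p.length + 1 →
      pvGoodF p f j → k = f.getD j 0 →
      pvGoodF p (pvBordersGo p f k (List.range' j len)) p.length := by
  intro len
  induction len with
  | zero =>
    intro j f k h1 h2 _ hg _
    have hj : j = p.length := by omega
    subst hj
    simpa [pvBordersGo] using hg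
  | succ len ih =>
    intro j f k h1 h2 hlen hg hk
    rw [List.range'_succ]
    simp only [pvBordersGo]
    have hjm : j < p.length := by omega
    have hGj := hg j h1 le_rfl
    have hkj : k < j := by rw [hk]; exact hGj.1
    obtain ⟨hrk, hrB, hstop, hcmax⟩ :=
      pvChain_spec p (f := f) (x := p.getD j 0) j (by omega) (fun jj a b => hg jj a b) k k
        le_rfl (by omega)
    set x := p.getD j 0 with hxdef
    set r := pvChain p f x k k with hrdef
    set k' := (if p.getD r 0 = x then r + 1 else r) with hk'def
    have hkB : pvBrd p k j := by rw [hk]; exact hGj.2.1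
    have hrj : pvBrd p r j := pvBrd_trans p r k j hrB hkB
    have hk'lt : k' < j + 1 := by rw [hk'def]; split <;> omega
    have hk'B : pvBrd p k' (j + 1) := by
      rw [hk'def]
      split
      · rename_i hx
        refine ⟨by omega, ?_⟩
        rw [pvTake_snoc p r (by omega), pvTake_snoc p j hjm, hx]
        obtain ⟨t, ht⟩ := hrj.2
        exact ⟨t, by rw [← List.append_assoc, ht]⟩
      · rename_i hx
        have r0 : r = 0 := by
          rcases hstop with h | h
          · exact h
          · exact absurd h hx
        rw [r0]
        exact ⟨by omega, by simp⟩
    have hk'max : ∀ b, b < j + 1 → pvBrd p b (j + 1) → b ≤ k' := by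
      intro b hb hbB
      rcases Nat.eq_zero_or_pos b with rfl | hb1
      · omega
      obtain ⟨b', rfl⟩ : ∃ b', b = b' + 1 := ⟨b - 1, by omega⟩
      have hbs := hbB.2
      rw [pvTake_snoc p j hjm] at hbs
      rw [pvTake_suffix_snoc_iff p (p.take j) x b' (by omega)] at hbs
      obtain ⟨hb's, hb'x⟩ := hbs
      have hb'j : b' < j := by omega
      have hb'k : b' ≤ k := by rw [hk]; exact hGj.2.2 b' hb'j ⟨by omega, hb's⟩
      have hb'B : pvBrd p b' k :=
        pvBrd_of_suffix_le p b' k j (le_of_lt hjm) hb'k ⟨by omega, hb's⟩ hkB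
      have hble : b' ≤ r := hcmax b' hb'B (Or.inr hb'x)
      rw [hk'def]
      split
      · omega
      · rename_i hx
        exfalso
        apply hx
        have hb0 : b' = 0 := by
          have r0 : r = 0 := by
            rcases hstop with h | h
            · exact h
            · exact absurd h hx
          omega
        have r0 : r = 0 := by
          rcases hstop with h | h
          · exact h
          · exact absurd h hx
        rw [r0, ← hb0]
        exact hb'x
    have hset : ∀ (idx : Nat), idx ≠ j + 1 → (f.set (j + 1) k').getD idx 0 = f.getD idx 0 := by
      intro idx h
      rw [List.getD_eq_getElem?_getD, List.getElem?_set_ne (by omega), ← List.getD_eq_getElem?_getD]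
    have hgetset : (f.set (j + 1) k').getD (j + 1) 0 = k' := by
      rw [List.getD_eq_getElem?_getD, List.getElem?_set_self (by omega)]
      rfl
    have hg' : pvGoodF p (f.set (j + 1) k') (j + 1) := by
      intro jj hjj1 hjj2
      rcases Nat.lt_or_ge jj (j + 1) with hlt | hge
      · rw [hset jj (by omega)]
        exact hg jj hjj1 (by omega)
      · have hjj : jj = j + 1 := by omega
        subst hjj
        rw [hgetset]
        exact ⟨hk'lt, hk'B, hk'max⟩
    exact ih (j + 1) (f.set (j + 1) k') k' (by omega) (by omega) (by simpa using hlen)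
      hg' hgetset.symm

theorem pvBorders_good (p : List Int) (hm : 1 ≤ p.length) :
    pvGoodF p (pvBorders p) p.length := by
  unfold pvBorders
  apply pvBordersGo_good p (p.length - 1) 1 _ 0 le_rfl (by omega) (by simp) ?_ ?_
  · intro j h1 h2
    have hj : j = 1 := by omega
    subst hj
    rw [pvReplicate_getD]
    exact ⟨by omega, ⟨by omega, by simp⟩, fun b hb _ => by omega⟩
  · rw [pvReplicate_getD]

-- ---- occurrences in c ++ c are rotations of c ----
theorem pvOcc_iff_rot (c p : List Int) (hlen : p.length = c.length) (hc : c ≠ []) :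
    (∃ i, 1 ≤ i ∧ i ≤ (c ++ c).length ∧ p <:+ (c ++ c).take i) ↔
      ∃ i, i < c.length ∧ pvRotL c i = p := by
  have hn : 1 ≤ c.length := by
    cases c
    · exact absurd rfl hc
    · simp
  constructor
  · rintro ⟨i, h1, h2, hsfx⟩
    have hlentake : ((c ++ c).take i).length = i := by
      simp only [List.length_take, List.length_append]
      simp only [List.length_append] at h2
      omega
    have hpi : p.length ≤ i := by
      have := hsfx.length_le
      omega
    obtain ⟨u, hu⟩ := hsfx
    have hul : u.length = i - p.length := by
      have : u.length + p.length = i := by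
        have := congrArg List.length hu
        simp only [List.length_append] at this
        omega
      omega
    set j := i - p.length with hjdef
    have hj : j ≤ c.length := by
      simp only [List.length_append] at h2
      omega
    have h3 : (c ++ c).drop j = p ++ (c ++ c).drop i := by
      conv_lhs => rw [← List.take_append_drop i (c ++ c)]
      rw [List.drop_append_of_le_length (by rw [hlentake]; omega), ← hu, ← hul, List.drop_left]
    have hslice : ((c ++ c).drop j).take c.length = p := by
      rw [h3, List.take_left' hlen]
    rw [pvSlice_eq_rotL c j hj] at hslice
    by_cases hjn : j < c.length
    · exact ⟨j, hjn, hslice⟩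
    · have : j = c.length := by omega
      refine ⟨0, by omega, ?_⟩
      rw [← pvRotL_length]
      rw [← this]
      exact hslice
  · rintro ⟨i, hi, hrot⟩
    refine ⟨i + c.length, by omega, by simp only [List.length_append]; omega, ?_⟩
    rw [← hlen, List.take_add]
    rw [hlen, pvSlice_eq_rotL c i (by omega), hrot]
    exact List.suffix_append _ _

-- ---- B's characterisation ----
theorem equivalent_cycle_alt_iff (c d : List Int) (hlen : c.length = d.length)
    (hne : c.length ≠ 0) :
    (equivalent_cycle_alt c d = true ↔
      ∃ i, i < c.length ∧ (pvRotL c i = d ∨ pvRotL c i = d.reverse)) := by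
  have hc : c ≠ [] := by
    intro h
    rw [h] at hne
    simp at hne
  have h1 := pvContains_iff (c ++ c) d (pvBorders d) (pvBorders_good d (by omega)) (by omega)
  have h2 := pvContains_iff (c ++ c) d.reverse (pvBorders d.reverse)
    (pvBorders_good d.reverse (by simp; omega)) (by simp; omega)
  have o1 := pvOcc_iff_rot c d hlen.symm hc
  have o2 := pvOcc_iff_rot c d.reverse (by simp; omega) hc
  show ((if d.length ≠ c.length then false
    else if c.length = 0 then true
    else if pvContains (c ++ c) d (pvBorders d) then true
    else pvContains (c ++ c) d.reverse (pvBorders d.reverse)) = true ↔ _)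
  rw [if_neg (by omega), if_neg hne]
  by_cases hA : pvContains (c ++ c) d (pvBorders d) = true
  · rw [if_pos hA]
    simp only [true_iff]
    obtain ⟨i, hi, hr⟩ := o1.mp (h1.mp hA)
    exact ⟨i, hi, Or.inl hr⟩
  · rw [if_neg hA]
    rw [h2, o2]
    constructor
    · rintro ⟨i, hi, hr⟩
      exact ⟨i, hi, Or.inr hr⟩
    · rintro ⟨i, hi, hr | hr⟩
      · exact absurd (h1.mpr (o1.mpr ⟨i, hi, hr⟩)) hA
      · exact ⟨i, hi, hr⟩

-- ===== VERDICT (by name: the statement is the Claim_ definition above) =====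
theorem equivalent_cycle_spec : Claim_unchanged_equivalent_cycle := by
  unfold Claim_unchanged_equivalent_cycle
  intro c d _ hnD
  by_cases hlen : c.length = d.length
  · by_cases hn : c.length = 0
    · exfalso
      apply hnD
      constructor
      · exact List.length_eq_zero_iff.mp hn
      · exact List.length_eq_zero_iff.mp (by omega)
    · rw [Bool.eq_iff_iff, equivalent_cycle_iff,
        equivalent_cycle_alt_iff c d hlen hn]
      constructor
      · rintro ⟨m, h1, h2, h3⟩
        have h3' : pvRotL c m = d ∨ pvRotL c m = d.reverse := by
          rcases h3 with h3 | h3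
          · exact Or.inl ((pvRotR_eq_iff c d m hlen h2).mp h3)
          · exact Or.inr ((pvRotR_eq_iff c d.reverse m (by simp; omega) (by simp; omega)).mp h3)
        by_cases hm : m = c.length
        · refine ⟨0, by omega, ?_⟩
          rw [← pvRotL_length]
          rwa [hm] at h3'
        · exact ⟨m, by omega, h3'⟩
      · rintro ⟨i, hi, h3⟩
        by_cases hi0 : i = 0
        · refine ⟨c.length, by omega, by omega, ?_⟩
          subst hi0
          rw [← pvRotL_length c] at h3
          rcases h3 with h3 | h3
          · exact Or.inl ((pvRotR_eq_iff c d c.length hlen (by omega)).mpr h3)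
          · exact Or.inr ((pvRotR_eq_iff c d.reverse c.length (by simp; omega) (by simp; omega)).mpr h3)
        · refine ⟨i, by omega, by omega, ?_⟩
          rcases h3 with h3 | h3
          · exact Or.inl ((pvRotR_eq_iff c d i hlen (by omega)).mpr h3)
          · exact Or.inr ((pvRotR_eq_iff c d.reverse i (by simp; omega) (by simp; omega)).mpr h3)
  · have hA : equivalent_cycle c d = false := by
      rw [← Bool.not_eq_true, equivalent_cycle_iff]
      rintro ⟨m, _, _, h3 | h3⟩
      · exact pvRotR_length_ne c d m hlen h3
      · exact pvRotR_length_ne c d.reverse m (by simpa using hlen) h3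
    have hB : equivalent_cycle_alt c d = false := by
      show (if d.length ≠ c.length then false else _) = false
      rw [if_pos (by omega)]
    rw [hA, hB]

theorem equivalent_cycle_changed : Claim_changed_equivalent_cycle := by
  unfold Claim_changed_equivalent_cycle; decide

theorem equivalent_cycle_tight : Claim_exact_equivalent_cycle := by
  unfold Claim_exact_equivalent_cycle
  rintro c d _ ⟨hc, hd⟩
  subst hc; subst hd
  decide
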